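-- pv_equiv track=rewrite | github.com/bigchan22/Ptab | BH/generate_data.py | split_into_connected_components
-- ===== SOURCE A (Python) =====
-- def split_into_connected_components(P):
--     components = [[]]
--     for i in range(len(P)-1):
--         components[-1].append(i+1)
--         if P[i] == i+1:
--             components.append([])
--     components[-1].append(len(P))
--     return components
-- ===== SOURCE B (Python) =====
-- def split_into_connected_components(P):
--     # Scan the values n-1 .. 1 backwards, flushing a finished component
--     # (reversed into ascending order) whenever a cut point P[v-1] == v is seen.
--     n = len(P)
--     comps = []
--     cur = [n]
--     for v in range(n - 1, 0, -1):
--         if P[v - 1] == v: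
--             comps.append(cur[::-1])
--             cur = [v]
--         else:
--             cur.append(v)
--     comps.append(cur[::-1])
--     return comps[::-1]
-- ===== Notes on version B (the rewrite author's own statement) =====
-- stated objective: alternative
-- what changed: B scans the values backwards (range(n-1,0,-1)), accumulating the current component and flushing it at each cut point, then reverses, instead of A's forward append-to-last-component loop that opens a trailing empty component after each cut.
import Mathlib
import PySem

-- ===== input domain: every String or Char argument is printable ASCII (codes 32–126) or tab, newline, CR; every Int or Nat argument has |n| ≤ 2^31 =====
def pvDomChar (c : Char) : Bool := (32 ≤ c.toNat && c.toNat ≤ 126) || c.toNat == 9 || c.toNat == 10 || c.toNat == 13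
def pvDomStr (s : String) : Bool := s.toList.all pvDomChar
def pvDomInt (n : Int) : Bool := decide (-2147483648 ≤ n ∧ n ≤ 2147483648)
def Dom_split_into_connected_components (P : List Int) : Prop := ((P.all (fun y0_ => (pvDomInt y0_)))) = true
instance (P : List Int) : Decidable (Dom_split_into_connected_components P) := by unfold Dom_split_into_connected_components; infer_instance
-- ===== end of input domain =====

-- B replaces A's forward append-to-last loop by a backward scan that flushes a
-- component at each cut point and reverses at the end (objective: alternative).

-- ===== PORT A =====
-- components[-1].append(x) is ported as dropLast ++ [last ++ [x]]; components is never empty.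
def split_into_connected_components (P : List Int) : List (List Int) :=
  let components : List (List Int) := [[]]
  let components :=
    (PySem.List.pyRange 0 ((P.length : Int) - 1) 1).foldl
      (fun components i =>
        let components := components.dropLast ++ [(components.getLast?.getD []) ++ [i + 1]]
        if PySem.List.pyGet? P i = some (i + 1) then components ++ [[]] else components)
      components
  components.dropLast ++ [(components.getLast?.getD []) ++ [(P.length : Int)]]

-- ===== PORT B =====
-- cur[::-1] is ported with PySem.List.slice? _ none none (-1) (exact: reverse slice).
def split_into_connected_components_alt (P : List Int) : List (List Int) :=
  let n : Int := P.length
  let state : List (List Int) × List Int :=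
    (PySem.List.pyRange (n - 1) 0 (-1)).foldl
      (fun (st : List (List Int) × List Int) v =>
        if PySem.List.pyGet? P (v - 1) = some v then
          (st.1 ++ [(PySem.List.slice? st.2 none none (-1)).getD []], [v])
        else
          (st.1, st.2 ++ [v]))
      ([], [n])
  ((PySem.List.slice? (state.1 ++ [(PySem.List.slice? state.2 none none (-1)).getD []]) none none (-1)).getD [])

-- ===== PRECONDITION & SPEC =====
def Spec_split_into_connected_components (P : List Int) (out : List (List Int)) : Prop := out = split_into_connected_components_alt P
instance (P : List Int) (out : List (List Int)) : Decidable (Spec_split_into_connected_components P out) := by unfold Spec_split_into_connected_components; infer_instance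

-- ===== CLAIM (what is proved, stated in full; the proofs are below) =====
def Claim_equal_split_into_connected_components : Prop := ∀ (P : List Int), Dom_split_into_connected_components P → Spec_split_into_connected_components P (split_into_connected_components P)

-- ===== LEMMAS AND PROOFS =====

-- canonical back-to-front description of the components, over the ascending value list
def gVal (P : List Int) (v : Int) (acc : List (List Int)) : List (List Int) :=
  if PySem.List.pyGet? P (v - 1) = some v then [v] :: acc
  else (v :: acc.headD []) :: acc.tail

lemma foldr_gVal_ne_nil (P : List Int) (L : Int) (vs : List Int) :
    vs.foldr (gVal P) [[L]] ≠ [] := by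
  induction vs with
  | nil => simp
  | cons v vs ih => simp only [List.foldr_cons, gVal]; split_ifs <;> simp

-- A's loop followed by the final append equals the foldr description
lemma loopA_eq (P : List Int) (L : Int) :
    ∀ (is : List Int) (s : List (List Int)),
      (is.foldl
        (fun components i =>
          let components := components.dropLast ++ [(components.getLast?.getD []) ++ [i + 1]]
          if PySem.List.pyGet? P i = some (i + 1) then components ++ [[]] else components)
        s).dropLast ++
        [((is.foldl
            (fun components i =>
              let components := components.dropLast ++ [(components.getLast?.getD []) ++ [i + 1]]
              if PySem.List.pyGet? P i = some (i + 1) then components ++ [[]] else components)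
            s).getLast?.getD []) ++ [L]] =
      s.dropLast ++
        (((s.getLast?.getD []) ++ ((is.map (· + 1)).foldr (gVal P) [[L]]).headD [])
          :: ((is.map (· + 1)).foldr (gVal P) [[L]]).tail) := by
  intro is
  induction is with
  | nil => intro s; simp
  | cons i is ih =>
    intro s
    simp only [List.foldl_cons, List.map_cons, List.foldr_cons]
    rw [ih]
    obtain ⟨a, t, hR⟩ := List.exists_cons_of_ne_nil (foldr_gVal_ne_nil P L (is.map (· + 1)))
    rw [hR]
    by_cases h : PySem.List.pyGet? P i = some (i + 1)
    · simp only [gVal, show (i + 1 : Int) - 1 = i by ring, h, if_pos]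
      simp
    · simp only [gVal, show (i + 1 : Int) - 1 = i by ring, h, if_false]
      cases s with
      | nil => simp
      | cons b u =>
        rw [show ((b :: u).dropLast ++ [(b :: u).getLast?.getD [] ++ [i + 1]] : List (List Int)).dropLast
              = (b :: u).dropLast by simp,
            List.getLast?_concat]
        simp

-- B's fold, read back-to-front after reversing the scan order, equals the foldr description
lemma loopB_eq (P : List Int) :
    ∀ (vs : List Int) (cs : List (List Int)) (cur : List Int),
      ((vs.foldr
          (fun (v : Int) (st : List (List Int) × List Int) =>
            if PySem.List.pyGet? P (v - 1) = some v then
              (st.1 ++ [st.2.reverse], [v])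
            else
              (st.1, st.2 ++ [v]))
          (cs, cur)).1 ++
        [(vs.foldr
            (fun (v : Int) (st : List (List Int) × List Int) =>
              if PySem.List.pyGet? P (v - 1) = some v then
                (st.1 ++ [st.2.reverse], [v])
              else
                (st.1, st.2 ++ [v]))
            (cs, cur)).2.reverse]).reverse =
      vs.foldr (gVal P) ((cs ++ [cur.reverse]).reverse) := by
  intro vs
  induction vs with
  | nil => intro cs cur; simp
  | cons v vs ih =>
    intro cs cur
    simp only [List.foldr_cons]
    cases hst : (vs.foldr
        (fun (v : Int) (st : List (List Int) × List Int) =>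
          if PySem.List.pyGet? P (v - 1) = some v then
            (st.1 ++ [st.2.reverse], [v])
          else
            (st.1, st.2 ++ [v]))
        (cs, cur)) with
    | mk A B =>
      have hih := ih cs cur
      rw [hst] at hih
      by_cases h : PySem.List.pyGet? P (v - 1) = some v
      · simp only [h, if_pos, gVal]
        rw [show ((A ++ [B.reverse] ++ [[v].reverse]).reverse : List (List Int))
              = [v] :: (A ++ [B.reverse]).reverse by simp]
        rw [hih]
      · simp only [h, if_false, gVal]
        rw [← hih]
        simp

lemma map_add_one_pyRange (n : Int) :
    ((PySem.List.pyRange 0 (n - 1) 1).map (· + 1)) = PySem.List.pyRange 1 n 1 := by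
  rw [PySem.List.pyRange_one 0 (n - 1), PySem.List.pyRange_one 1 n]
  rw [List.map_map]
  have : (n - 1 - 0).toNat = (n - 1).toNat := by norm_num
  rw [this]
  apply List.map_congr_left
  intro k _
  simp; ring

-- ===== VERDICT (by name: the statement is the Claim_ definition above) =====
theorem split_into_connected_components_spec : Claim_equal_split_into_connected_components := by
  intro P _
  unfold Spec_split_into_connected_components split_into_connected_components split_into_connected_components_alt
  simp only [PySem.List.slice?_none_none_neg_one, Option.getD_some]
  rw [loopA_eq P (P.length : Int) (PySem.List.pyRange 0 ((P.length : Int) - 1) 1) [[]]]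
  rw [PySem.List.pyRange_neg_one_eq_reverse, List.foldl_reverse]
  rw [show ((0 : Int) + 1) = 1 by norm_num,
      show ((P.length : Int) - 1 + 1) = (P.length : Int) by ring]
  rw [map_add_one_pyRange]
  rw [loopB_eq P (PySem.List.pyRange 1 (P.length : Int) 1) [] [(P.length : Int)]]
  rw [show (([] : List (List Int)) ++ [[(P.length : Int)].reverse]).reverse = [[(P.length : Int)]] by simp]
  obtain ⟨a, t, hR⟩ :=
    List.exists_cons_of_ne_nil (foldr_gVal_ne_nil P (P.length : Int) (PySem.List.pyRange 1 (P.length : Int) 1))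
  rw [hR]
  simp
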